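-- pv_equiv track=rewrite | github.com/akarnat1/simpleCipherEncryption | caesarCipherEdit.py | processMessage
-- ===== SOURCE A (Python) =====
-- PRINTABLE_ASCII_MIN = 32
--
-- PRINTABLE_ASCII_LIMIT = 127
--
-- TOTAL_PRINTABLE=95
--
-- def keepInBounds(ordin):
--   if ordin>=PRINTABLE_ASCII_LIMIT:
--     while ordin>=PRINTABLE_ASCII_LIMIT:
--       ordin-=TOTAL_PRINTABLE
--   else:
--     while ordin<PRINTABLE_ASCII_MIN:
--       ordin+=TOTAL_PRINTABLE
--   return ordin
--
-- def processMessage(message, rotationKey):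
--       rotationKeyInt=int(rotationKey)
--       newStr=''
--       for char in message:
--         ordinal=ord(char)+rotationKeyInt
--         if ordinal>=PRINTABLE_ASCII_MIN and ordinal<PRINTABLE_ASCII_LIMIT:
--           newStr+=chr(ordinal)
--         else:
--           validOrd=keepInBounds(ordinal)
--           newStr+=chr(validOrd)
--       return newStr
-- ===== SOURCE B (Python) =====
-- def processMessage(message, rotationKey):
--     rotationKeyInt = int(rotationKey)
--     table = {}
--     for ch in set(message):
--         table[ord(ch)] = (ord(ch) + rotationKeyInt - 32) % 95 + 32
--     return message.translate(table)
-- ===== Notes on version B (the rewrite author's own statement) =====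
-- stated objective: faster
-- what changed: Replaces A's per-character keepInBounds correction loops (which step by 95 proportionally to |rotationKey|) and string += concatenation by a codepoint-keyed translation table built once over the distinct characters with the closed form ((ord(c)+key-32)%95)+32, applied via str.translate.
import Mathlib
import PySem

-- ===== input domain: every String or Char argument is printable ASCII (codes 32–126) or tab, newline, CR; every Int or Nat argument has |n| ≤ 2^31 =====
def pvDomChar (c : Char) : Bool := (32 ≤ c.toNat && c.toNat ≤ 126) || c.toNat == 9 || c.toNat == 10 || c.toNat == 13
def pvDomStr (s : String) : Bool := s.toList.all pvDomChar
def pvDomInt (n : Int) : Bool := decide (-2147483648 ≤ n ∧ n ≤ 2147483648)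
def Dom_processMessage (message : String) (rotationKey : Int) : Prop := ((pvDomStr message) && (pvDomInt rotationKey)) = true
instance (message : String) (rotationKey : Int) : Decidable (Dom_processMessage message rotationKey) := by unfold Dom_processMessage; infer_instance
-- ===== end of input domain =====

-- B replaces A's per-character correction loops and string concatenation by a codepoint-keyed
-- translation table (closed-form modulo) built over the distinct characters, applied by translate.

-- ===== PORT A =====
-- 'while ordin >= 127: ordin -= 95'
def kibDown (ordin : Int) : Int :=
  if h : ordin ≥ 127 then kibDown (ordin - 95) else ordin
termination_by ordin.toNat
decreasing_by omega

-- 'while ordin < 32: ordin += 95'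
def kibUp (ordin : Int) : Int :=
  if h : ordin < 32 then kibUp (ordin + 95) else ordin
termination_by (32 - ordin).toNat
decreasing_by omega

def keepInBounds (ordin : Int) : Int :=
  if ordin ≥ 127 then kibDown ordin else kibUp ordin

def processMessage (message : String) (rotationKey : Int) : String :=
  let rotationKeyInt := rotationKey
  String.ofList (message.toList.foldl (fun newStr char =>
    let ordinal : Int := (char.toNat : Int) + rotationKeyInt
    if 32 ≤ ordinal ∧ ordinal < 127 then
      newStr ++ [Char.ofNat ordinal.toNat]
    else
      newStr ++ [Char.ofNat (keepInBounds ordinal).toNat]) [])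

-- ===== PORT B =====
def processMessage_alt (message : String) (rotationKey : Int) : String :=
  let rotationKeyInt := rotationKey
  let table : PySem.Dict Int Int :=
    (PySem.Set.ofList message.toList).foldl
      (fun d ch => d.insert ((ch.toNat : Int))
        (PySem.Int.mod ((ch.toNat : Int) + rotationKeyInt - 32) 95 + 32))
      PySem.Dict.empty
  -- str.translate: each codepoint looked up in the table, kept unchanged if absent
  String.ofList (message.toList.map (fun ch =>
    match table.get? ((ch.toNat : Int)) with
    | some v => Char.ofNat v.toNat
    | none => ch))

-- ===== PRECONDITION & SPEC =====
def Spec_processMessage (message : String) (rotationKey : Int) (out : String) : Prop := out = processMessage_alt message rotationKey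
instance (message : String) (rotationKey : Int) (out : String) : Decidable (Spec_processMessage message rotationKey out) := by unfold Spec_processMessage; infer_instance

-- ===== CLAIM (what is proved, stated in full; the proofs are below) =====
def Claim_equal_processMessage : Prop := ∀ (message : String) (rotationKey : Int), Dom_processMessage message rotationKey → Spec_processMessage message rotationKey (processMessage message rotationKey)

-- ===== LEMMAS AND PROOFS =====

theorem kibDown_eq (o : Int) (h : 32 ≤ o) : kibDown o = (o - 32) % 95 + 32 := by
  rw [kibDown]
  split_ifs with h1
  · rw [kibDown_eq (o - 95) (by omega)]
    have : o - 95 - 32 = o - 32 - 95 := by ring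
    rw [this, Int.sub_emod_right]
  · omega
termination_by o.toNat
decreasing_by omega

theorem kibUp_eq (o : Int) (h : o < 127) : kibUp o = (o - 32) % 95 + 32 := by
  rw [kibUp]
  split_ifs with h1
  · rw [kibUp_eq (o + 95) (by omega)]
    have : o + 95 - 32 = o - 32 + 95 := by ring
    rw [this, Int.add_emod_right]
  · omega
termination_by (32 - o).toNat
decreasing_by omega

theorem keepInBounds_eq (o : Int) : keepInBounds o = (o - 32) % 95 + 32 := by
  unfold keepInBounds
  split_ifs with h
  · exact kibDown_eq o (by omega)
  · exact kibUp_eq o (by omega)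

-- the per-character result both programs compute
def pvShift (k : Int) (c : Char) : Char :=
  Char.ofNat ((((c.toNat : Int) + k - 32) % 95 + 32)).toNat

theorem foldl_append_map {α β : Type} (g : α → β) :
    ∀ (l : List α) (acc : List β),
      l.foldl (fun a c => a ++ [g c]) acc = acc ++ l.map g := by
  intro l
  induction l with
  | nil => simp
  | cons c l ih => intro acc; simp [List.foldl, ih]

theorem processMessage_eq_map (message : String) (k : Int) :
    processMessage message k = String.ofList (message.toList.map (pvShift k)) := by
  unfold processMessage
  have hcong : message.toList.foldl (fun newStr char =>
      let ordinal : Int := (char.toNat : Int) + k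
      if 32 ≤ ordinal ∧ ordinal < 127 then newStr ++ [Char.ofNat ordinal.toNat]
      else newStr ++ [Char.ofNat (keepInBounds ordinal).toNat]) []
      = message.toList.foldl (fun a c => a ++ [pvShift k c]) [] := by
    apply PySem.List.foldl_congr_mem
    intro a c _
    simp only [pvShift, keepInBounds_eq]
    split_ifs with h
    · have h1 : ((c.toNat : Int) + k - 32) % 95 = (c.toNat : Int) + k - 32 :=
        Int.emod_eq_of_lt (by omega) (by omega)
      have h2 : (c.toNat : Int) + k - 32 + 32 = (c.toNat : Int) + k := by ring
      rw [h1, h2]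
    · rfl
  simp only [hcong, foldl_append_map, List.nil_append]

theorem get?_table (v : Int → Int) :
    ∀ (l : List Char) (d : PySem.Dict Int Int) (c : Char),
      (c ∈ l ∨ d.get? ((c.toNat : Int)) = some (v (c.toNat : Int))) →
      (l.foldl (fun d ch => d.insert ((ch.toNat : Int)) (v (ch.toNat : Int))) d).get?
          ((c.toNat : Int)) = some (v (c.toNat : Int)) := by
  intro l
  induction l with
  | nil =>
    intro d c h
    simpa using h.resolve_left (by simp)
  | cons a l ih =>
    intro d c h
    simp only [List.foldl]
    apply ih
    by_cases hk : ((c.toNat : Int)) = ((a.toNat : Int))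
    · right
      rw [hk, PySem.Dict.get?_insert_self]
    · rcases h with h | h
      · rcases List.mem_cons.mp h with rfl | hmem
        · exact absurd rfl hk
        · exact Or.inl hmem
      · right
        rw [PySem.Dict.get?_insert_of_ne _ _ hk, h]

theorem processMessage_alt_eq_map (message : String) (k : Int) :
    processMessage_alt message k = String.ofList (message.toList.map (pvShift k)) := by
  unfold processMessage_alt
  simp only
  congr 1
  apply List.map_congr_left
  intro c hc
  have hmem : c ∈ PySem.Set.ofList message.toList := (PySem.Set.mem_ofList _ _).mpr hc
  rw [get?_table (fun x => PySem.Int.mod (x + k - 32) 95 + 32) _ _ c (Or.inl hmem)]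
  simp only [pvShift, PySem.Int.mod_eq_emod_of_pos (by norm_num : (0:Int) < 95)]

-- ===== VERDICT (by name: the statement is the Claim_ definition above) =====
theorem processMessage_spec : Claim_equal_processMessage := by
  intro message rotationKey _
  unfold Spec_processMessage
  rw [processMessage_eq_map, processMessage_alt_eq_map]
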